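-- pv_equiv track=rewrite | github.com/ronpolonsky/language-model-from-scratch | my_code/bpe_tokenizer.py | choose_best_pair
-- ===== SOURCE A (Python) =====
-- def choose_best_pair(pair_counts):
--     if not pair_counts:
--         return None
--
--     best_pair = None
--     best_count = -1  # any real count will be >= 0
--
--     for pair, cnt in pair_counts.items():
--         if cnt > best_count:
--             best_count = cnt
--             best_pair = pair
--         elif cnt == best_count:
--             # tie: prefer lexicographically greater pair
--             if best_pair is None or pair > best_pair:
--                 best_pair = pair
--
--     return best_pair
-- ===== SOURCE B (Python) =====
-- def choose_best_pair(pair_counts):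
--     if not pair_counts:
--         return None
--     return sorted(pair_counts.items(), key=lambda kv: (kv[1], kv[0]))[-1][0]
-- ===== Notes on version B (the rewrite author's own statement) =====
-- stated objective: alternative
-- what changed: Replaces the running-best scan (mutable best_pair/best_count with a tie branch) by sorting all items ascending by the composite key (count, pair) and returning the pair of the last element.
-- outside the precondition, e.g. on choose_best_pair({('a', 'b'): -2}): A returns None, B returns ('a', 'b')
import Mathlib
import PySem

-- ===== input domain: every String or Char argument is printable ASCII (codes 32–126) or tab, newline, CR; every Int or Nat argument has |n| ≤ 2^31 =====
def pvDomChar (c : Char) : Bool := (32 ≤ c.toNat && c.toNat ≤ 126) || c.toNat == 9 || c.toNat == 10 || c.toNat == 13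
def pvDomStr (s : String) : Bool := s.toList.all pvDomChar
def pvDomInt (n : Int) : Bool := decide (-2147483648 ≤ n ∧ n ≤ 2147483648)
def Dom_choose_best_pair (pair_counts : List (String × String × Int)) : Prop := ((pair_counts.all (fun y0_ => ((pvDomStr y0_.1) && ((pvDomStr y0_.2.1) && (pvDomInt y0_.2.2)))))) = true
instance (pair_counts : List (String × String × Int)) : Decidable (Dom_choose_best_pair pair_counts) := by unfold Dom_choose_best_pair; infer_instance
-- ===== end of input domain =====

-- B replaces A's running-best scan by sorting the items ascending on the composite key (count, pair)
-- and taking the last element's pair (objective: alternative algorithm, not faster).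
-- The dict parameter arrives as an association list; both ports read it with dict semantics (PySem.Dict.ofList).

-- shared input decoding: the dict's items, ((pair), count), duplicate keys merged as Python's dict does
def cbpItems (pair_counts : List (String × String × Int)) : List ((String × String) × Int) :=
  (PySem.Dict.ofList (pair_counts.map fun t => ((t.1, t.2.1), t.2.2))).items

-- Python's lexicographic comparison of the tuple (count, pair)
def cbpKey (kv : (String × String) × Int) : Lex (Int × Lex (String × String)) :=
  toLex (kv.2, toLex kv.1)

-- ===== PORT A =====
-- one iteration of A's loop over (best_pair, best_count); 'pair > best_pair' is Python's
-- lexicographic tuple comparison, written with toLex (Lean's Prod '<' is pointwise)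
def cbpStep (st : Option (String × String) × Int) (kv : (String × String) × Int) :
    Option (String × String) × Int :=
  if st.2 < kv.2 then (some kv.1, kv.2)
  else if kv.2 = st.2 then
    match st.1 with
    | none => (some kv.1, st.2)
    | some p => if toLex p < toLex kv.1 then (some kv.1, st.2) else st
  else st

def choose_best_pair (pair_counts : List (String × String × Int)) : Option (String × String) :=
  if cbpItems pair_counts = [] then none
  else ((cbpItems pair_counts).foldl cbpStep (none, -1)).1

-- ===== PORT B =====
def choose_best_pair_alt (pair_counts : List (String × String × Int)) : Option (String × String) :=
  if cbpItems pair_counts = [] then none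
  else
    match PySem.List.pyGet? (PySem.List.sorted (cbpItems pair_counts) cbpKey) (-1) with
    | some kv => some kv.1
    | none => none

-- ===== PRECONDITION & SPEC =====
-- Pre_ excludes dicts containing a negative count: pair counts are frequencies (always ≥ 0 where A is used),
-- and on all-negative counts A's '-1' sentinel makes it return None for a non-empty dict, a value B does not reproduce.
def Pre_choose_best_pair (pair_counts : List (String × String × Int)) : Prop :=
  ∀ kv ∈ cbpItems pair_counts, 0 ≤ kv.2
instance (pair_counts : List (String × String × Int)) : Decidable (Pre_choose_best_pair pair_counts) := by
  unfold Pre_choose_best_pair; infer_instance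

def pvWitness_choose_best_pair : (List (String × String × Int)) := [("a", "b", 3), ("c", "d", 3)]

def Spec_choose_best_pair (pair_counts : List (String × String × Int)) (out : Option (String × String)) : Prop :=
  out = choose_best_pair_alt pair_counts
instance (pair_counts : List (String × String × Int)) (out : Option (String × String)) : Decidable (Spec_choose_best_pair pair_counts out) := by
  unfold Spec_choose_best_pair; infer_instance

-- ===== CLAIM (what is proved, stated in full; the proofs are below) =====
def Claim_equal_choose_best_pair : Prop := ∀ (pair_counts : List (String × String × Int)), Dom_choose_best_pair pair_counts → Pre_choose_best_pair pair_counts → Spec_choose_best_pair pair_counts (choose_best_pair pair_counts)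

-- ===== LEMMAS AND PROOFS =====

theorem cbpKey_inj {a b : (String × String) × Int} (h : cbpKey a = cbpKey b) : a = b := by
  rcases a with ⟨p, c⟩; rcases b with ⟨q, d⟩
  simp [cbpKey, Prod.ext_iff] at h
  simp [Prod.ext_iff, h.1, h.2]

theorem cbpKey_le_snd {a b : (String × String) × Int} (h : cbpKey a ≤ cbpKey b) : a.2 ≤ b.2 := by
  rcases Prod.Lex.le_iff.1 h with h' | h' <;> simp [cbpKey] at h' <;> omega

-- the running maximum A maintains once its state is 'some'
def cbpMax (seed : (String × String) × Int) (l : List ((String × String) × Int)) :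
    (String × String) × Int :=
  l.foldl (fun acc kv => if cbpKey acc < cbpKey kv then kv else acc) seed

theorem max?_cons_cbp (l : List ((String × String) × Int)) (seed : (String × String) × Int) :
    PySem.List.max? (seed :: l) cbpKey = some (cbpMax seed l) := by
  induction l generalizing seed with
  | nil => rfl
  | cons x t ih =>
      have h1 : PySem.List.max? (seed :: x :: t) cbpKey
          = PySem.List.max? ((if cbpKey seed < cbpKey x then x else seed) :: t) cbpKey := by
        by_cases h : cbpKey seed < cbpKey x <;> simp [PySem.List.max?, List.foldl, h]
      have h2 : cbpMax seed (x :: t) = cbpMax (if cbpKey seed < cbpKey x then x else seed) t := by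
        by_cases h : cbpKey seed < cbpKey x <;> simp [cbpMax, List.foldl, h]
      rw [h1, ih, h2]

theorem cbpMax_mem (seed : (String × String) × Int) (l : List ((String × String) × Int)) :
    cbpMax seed l ∈ seed :: l :=
  PySem.List.max?_mem (max?_cons_cbp l seed)

theorem cbpMax_isMax (seed : (String × String) × Int) (l : List ((String × String) × Int)) :
    ∀ t ∈ seed :: l, cbpKey t ≤ cbpKey (cbpMax seed l) :=
  PySem.List.max?_isMax (max?_cons_cbp l seed)

theorem cbpStep_some (p : String × String) (c : Int) (kv : (String × String) × Int) :
    cbpStep (some p, c) kv =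
      (some (if cbpKey (p, c) < cbpKey kv then kv else (p, c)).1,
       (if cbpKey (p, c) < cbpKey kv then kv else (p, c)).2) := by
  rcases kv with ⟨q, d⟩
  by_cases h1 : c < d
  · have hk : cbpKey (p, c) < cbpKey (q, d) := by
      rw [Prod.Lex.lt_iff]; left; simpa [cbpKey] using h1
    simp [cbpStep, h1, hk]
  · by_cases h2 : d = c
    · subst h2
      by_cases h3 : toLex p < toLex q
      · have hk : cbpKey (p, d) < cbpKey (q, d) := by
          rw [Prod.Lex.lt_iff]; right; exact ⟨rfl, h3⟩
        simp [cbpStep, h3, hk]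
      · have hk : ¬ cbpKey (p, d) < cbpKey (q, d) := by
          intro hlt
          rcases Prod.Lex.lt_iff.1 hlt with h' | ⟨_, h''⟩
          · simp [cbpKey] at h'
          · exact h3 h''
        simp [cbpStep, h3, hk]
    · have hk : ¬ cbpKey (p, c) < cbpKey (q, d) := by
        intro hlt
        rcases Prod.Lex.lt_iff.1 hlt with h' | ⟨he, _⟩
        · simp [cbpKey] at h'; omega
        · simp [cbpKey] at he; omega
      simp [cbpStep, h1, h2, hk]

theorem foldl_cbpStep_some (l : List ((String × String) × Int)) (p : String × String) (c : Int) :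
    List.foldl cbpStep (some p, c) l = (some (cbpMax (p, c) l).1, (cbpMax (p, c) l).2) := by
  induction l generalizing p c with
  | nil => rfl
  | cons kv t ih =>
      simp only [List.foldl, cbpStep_some, cbpMax]
      by_cases h : cbpKey (p, c) < cbpKey kv <;> simp only [h, if_true, if_false] <;>
        [exact ih kv.1 kv.2; exact ih p c]

theorem cbpStep_none_skip (kv : (String × String) × Int) (h : kv.2 < -1) :
    cbpStep (none, -1) kv = (none, -1) := by
  have h1 : ¬ ((-1:Int) < kv.2) := by omega
  have h2 : ¬ (kv.2 = (-1:Int)) := by omega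
  simp [cbpStep, h1, h2]

theorem cbpStep_none_take (kv : (String × String) × Int) (h : -1 ≤ kv.2) :
    cbpStep (none, -1) kv = (some kv.1, kv.2) := by
  by_cases h1 : (-1:Int) < kv.2
  · simp [cbpStep, h1]
  · have h2 : kv.2 = (-1:Int) := by omega
    simp [cbpStep, h2]

theorem foldl_cbpStep_none_main (l : List ((String × String) × Int))
    (h : ∃ kv ∈ l, -1 ≤ kv.2) :
    ∃ m, List.foldl cbpStep (none, -1) l = (some m.1, m.2) ∧ m ∈ l ∧
      ∀ t ∈ l, cbpKey t ≤ cbpKey m := by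
  induction l with
  | nil => simp at h
  | cons kv t ih =>
      by_cases hkv : -1 ≤ kv.2
      · refine ⟨cbpMax kv t, ?_, cbpMax_mem kv t, cbpMax_isMax kv t⟩
        simp only [List.foldl, cbpStep_none_take kv hkv]
        simpa using foldl_cbpStep_some t kv.1 kv.2
      · have hlt : kv.2 < -1 := by omega
        obtain ⟨w, hw, hwc⟩ := h
        rcases List.mem_cons.1 hw with rfl | hw'
        · omega
        obtain ⟨m, hm1, hm2, hm3⟩ := ih ⟨w, hw', hwc⟩
        refine ⟨m, ?_, List.mem_cons_of_mem kv hm2, ?_⟩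
        · simp only [List.foldl, cbpStep_none_skip kv hlt]; exact hm1
        · intro t' ht'
          rcases List.mem_cons.1 ht' with rfl | ht''
          · have hm2' : -1 ≤ m.2 := le_trans hwc (cbpKey_le_snd (hm3 w hw'))
            refine le_of_lt ?_
            rw [Prod.Lex.lt_iff]; left; simp [cbpKey]; omega
          · exact hm3 t' ht''

theorem pairwise_le_getLast (s : List ((String × String) × Int)) (hs : s ≠ [])
    (hp : s.Pairwise (fun a b => cbpKey a ≤ cbpKey b)) :
    ∀ t ∈ s, cbpKey t ≤ cbpKey (s.getLast hs) := by
  induction s with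
  | nil => exact absurd rfl hs
  | cons a s' ih =>
      rcases List.pairwise_cons.1 hp with ⟨ha, hp'⟩
      intro t ht
      rcases List.mem_cons.1 ht with rfl | ht'
      · rcases eq_or_ne s' [] with h' | h'
        · subst h'; simp
        · rw [List.getLast_cons h']
          exact ha _ (List.getLast_mem h')
      · rcases eq_or_ne s' [] with h' | h'
        · subst h'; simp at ht'
        · rw [List.getLast_cons h']
          exact ih h' hp' t ht'

theorem sorted_last_main (l : List ((String × String) × Int)) (hl : l ≠ []) :
    ∃ m, (PySem.List.sorted l cbpKey).getLast? = some m ∧ m ∈ l ∧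
      ∀ t ∈ l, cbpKey t ≤ cbpKey m := by
  have hs : PySem.List.sorted l cbpKey ≠ [] := by
    simpa [PySem.List.sorted_eq_nil_iff] using hl
  refine ⟨(PySem.List.sorted l cbpKey).getLast hs, List.getLast?_eq_some_getLast hs, ?_, ?_⟩
  · exact (PySem.List.mem_sorted l cbpKey false _).1 (List.getLast_mem hs)
  · intro t ht
    exact pairwise_le_getLast _ hs (PySem.List.sorted_pairwise l cbpKey) t
      ((PySem.List.mem_sorted l cbpKey false t).2 ht)

theorem choose_best_pair_spec : Claim_equal_choose_best_pair := by
  intro pc _ hpre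
  by_cases hnil : cbpItems pc = []
  · simp [Spec_choose_best_pair, choose_best_pair, choose_best_pair_alt, hnil]
  · have hex : ∃ kv ∈ cbpItems pc, -1 ≤ kv.2 := by
      rcases List.exists_mem_of_ne_nil _ hnil with ⟨kv, hkv⟩
      exact ⟨kv, hkv, by have := hpre kv hkv; omega⟩
    obtain ⟨mA, hA1, hA2, hA3⟩ := foldl_cbpStep_none_main _ hex
    obtain ⟨mB, hB1, hB2, hB3⟩ := sorted_last_main _ hnil
    have hmm : mA = mB := cbpKey_inj (le_antisymm (hB3 _ hA2) (hA3 _ hB2))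
    simp [Spec_choose_best_pair, choose_best_pair, choose_best_pair_alt, hnil, hA1,
      PySem.List.pyGet?_neg_one, hB1, hmm]
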